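-- pv_equiv track=rewrite | github.com/lovenya/Measuring-Faithfulness-of-CoT-Reasoning-LALMs | data_processing/mask_jasco.py | map_virtual_to_physical
-- ===== SOURCE A (Python) =====
-- def map_virtual_to_physical(start_v, end_v, valid_regions):
--     """
--     Given a virtual segment [start_v, end_v] within a sequence of contiguous
--     virtual blocks derived from valid_regions, return the corresponding
--     physical segments.
--     """
--     segments = []
--     current_v = 0
--     for s, e in valid_regions:
--         length = e - s
--         region_v_start = current_v
--         region_v_end = current_v + length
--
--         # Check overlap
--         overlap_start = max(start_v, region_v_start)
--         overlap_end = min(end_v, region_v_end)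
--
--         if overlap_start < overlap_end:
--             # Map back to physical
--             phys_start = s + (overlap_start - region_v_start)
--             phys_end = s + (overlap_end - region_v_start)
--             segments.append((phys_start, phys_end))
--
--         current_v += length
--
--     return segments
-- ===== SOURCE B (Python) =====
-- def map_virtual_to_physical(start_v, end_v, valid_regions):
--     # Window-shifting recursion: instead of accumulating a virtual offset,
--     # translate the query window into each region's own coordinate frame
--     # (subtracting the region length on recursion), clamp it to [0, length],
--     # and prepend the clamped segment when non-empty.
--     if not valid_regions:
--         return []
--     (s, e), rest = valid_regions[0], valid_regions[1:]
--     length = e - s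
--     lo = max(start_v, 0)
--     hi = min(end_v, length)
--     head = [(s + lo, s + hi)] if lo < hi else []
--     return head + map_virtual_to_physical(start_v - length, end_v - length, rest)
-- ===== Notes on version B (the rewrite author's own statement) =====
-- stated objective: alternative
-- what changed: Replaces the iterative loop with a running virtual-offset accumulator by a window-shifting recursion that keeps no offset at all: the query interval is translated into each region's local coordinate frame and clamped to [0, length].
import Mathlib
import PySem

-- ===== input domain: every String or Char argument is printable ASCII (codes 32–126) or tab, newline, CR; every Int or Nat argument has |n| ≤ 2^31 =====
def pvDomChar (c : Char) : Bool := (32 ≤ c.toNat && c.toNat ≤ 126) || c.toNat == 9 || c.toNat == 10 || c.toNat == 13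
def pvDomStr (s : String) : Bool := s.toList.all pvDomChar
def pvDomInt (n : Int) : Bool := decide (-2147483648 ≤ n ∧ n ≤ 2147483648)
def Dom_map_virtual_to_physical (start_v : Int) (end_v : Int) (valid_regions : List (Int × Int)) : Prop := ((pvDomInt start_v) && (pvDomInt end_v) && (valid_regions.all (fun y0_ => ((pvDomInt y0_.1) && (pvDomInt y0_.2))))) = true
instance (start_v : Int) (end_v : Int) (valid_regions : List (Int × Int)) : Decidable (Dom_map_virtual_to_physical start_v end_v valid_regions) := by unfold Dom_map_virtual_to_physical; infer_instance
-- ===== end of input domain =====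

-- B replaces A's offset-accumulating loop with a window-shifting recursion that
-- keeps no offset: the query interval is translated into each region's local
-- frame and clamped to [0, length] (alternative decomposition, same cost).

-- ===== PORT A =====
-- A: one loop carrying (segments, current_v); appends on strict overlap.
def map_virtual_to_physical (start_v : Int) (end_v : Int) (valid_regions : List (Int × Int)) : List (Int × Int) :=
  (valid_regions.foldl (fun (st : List (Int × Int) × Int) (r : Int × Int) =>
    let s := r.1
    let e := r.2
    let length := e - s
    let region_v_start := st.2
    let region_v_end := st.2 + length
    let overlap_start := max start_v region_v_start
    let overlap_end := min end_v region_v_end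
    let segs :=
      if overlap_start < overlap_end then
        st.1 ++ [(s + (overlap_start - region_v_start), s + (overlap_end - region_v_start))]
      else st.1
    (segs, st.2 + length)) ([], 0)).1

-- ===== PORT B =====
def map_virtual_to_physical_alt (start_v : Int) (end_v : Int) (valid_regions : List (Int × Int)) : List (Int × Int) :=
  match valid_regions with
  | [] => []
  | (s, e) :: rest =>
    let length := e - s
    let lo := max start_v 0
    let hi := min end_v length
    (if lo < hi then [(s + lo, s + hi)] else []) ++
      map_virtual_to_physical_alt (start_v - length) (end_v - length) rest

-- ===== PRECONDITION & SPEC =====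
def Spec_map_virtual_to_physical (start_v : Int) (end_v : Int) (valid_regions : List (Int × Int)) (out : List (Int × Int)) : Prop := out = map_virtual_to_physical_alt start_v end_v valid_regions
instance (start_v : Int) (end_v : Int) (valid_regions : List (Int × Int)) (out : List (Int × Int)) : Decidable (Spec_map_virtual_to_physical start_v end_v valid_regions out) := by unfold Spec_map_virtual_to_physical; infer_instance

-- ===== CLAIM (what is proved, stated in full; the proofs are below) =====
def Claim_equal_map_virtual_to_physical : Prop := ∀ (start_v : Int) (end_v : Int) (valid_regions : List (Int × Int)), Dom_map_virtual_to_physical start_v end_v valid_regions → Spec_map_virtual_to_physical start_v end_v valid_regions (map_virtual_to_physical start_v end_v valid_regions)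

-- ===== LEMMAS AND PROOFS =====

-- Loop invariant: A's foldl from state (acc, v) equals acc ++ B's recursion on
-- the window translated by -v (the offset accumulator vs the shifted window).
theorem pv_fold_eq (start_v end_v : Int) :
    ∀ (regions : List (Int × Int)) (acc : List (Int × Int)) (v : Int),
      (regions.foldl (fun (st : List (Int × Int) × Int) (r : Int × Int) =>
        let s := r.1
        let e := r.2
        let length := e - s
        let region_v_start := st.2
        let region_v_end := st.2 + length
        let overlap_start := max start_v region_v_start
        let overlap_end := min end_v region_v_end
        let segs :=
          if overlap_start < overlap_end then
            st.1 ++ [(s + (overlap_start - region_v_start), s + (overlap_end - region_v_start))]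
          else st.1
        (segs, st.2 + length)) (acc, v)).1
      = acc ++ map_virtual_to_physical_alt (start_v - v) (end_v - v) regions
  | [], acc, v => by simp [map_virtual_to_physical_alt]
  | (s, e) :: rest, acc, v => by
    simp only [List.foldl_cons, map_virtual_to_physical_alt]
    have hmax : max start_v v - v = max (start_v - v) 0 := by omega
    have hmin : min end_v (v + (e - s)) - v = min (end_v - v) (e - s) := by omega
    have hcond : (max start_v v < min end_v (v + (e - s))) ↔
        (max (start_v - v) 0 < min (end_v - v) (e - s)) := by omega
    have hrec := pv_fold_eq start_v end_v rest
      (if max start_v v < min end_v (v + (e - s)) then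
        acc ++ [(s + (max start_v v - v), s + (min end_v (v + (e - s)) - v))]
      else acc) (v + (e - s))
    by_cases h : max start_v v < min end_v (v + (e - s))
    · simp only [h, if_true] at hrec
      rw [if_pos h, hrec]
      rw [if_pos (hcond.mp h)]
      simp only [List.append_assoc, List.singleton_append, hmax, hmin, Int.sub_sub]
    · simp only [h, if_false] at hrec
      rw [if_neg h, hrec, if_neg (fun hc => h (hcond.mpr hc))]
      simp only [Int.sub_sub, List.nil_append]

-- ===== VERDICT (by name: the statement is the Claim_ definition above) =====
theorem map_virtual_to_physical_spec : Claim_equal_map_virtual_to_physical := by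
  intro start_v end_v valid_regions _
  unfold Spec_map_virtual_to_physical map_virtual_to_physical
  have h := pv_fold_eq start_v end_v valid_regions [] 0
  simpa using h
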